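-- pv_equiv track=rewrite | github.com/barryw/NovaVM | tools/gen_runtime_abi_docs.py | resolve_expr
-- ===== SOURCE A (Python) =====
-- def resolve_expr(expr: str, equates: dict[str, str], seen: set[str] | None = None) -> int | None:
--     expr = expr.strip()
--     if not expr:
--         return None
--     if expr.startswith("$"):
--         return int(expr[1:], 16)
--     if expr.startswith("0x"):
--         return int(expr, 16)
--     if expr.isdigit():
--         return int(expr)
--
--     if seen is None:
--         seen = set()
--     if expr in seen or expr not in equates:
--         return None
--     seen.add(expr)
--     return resolve_expr(equates[expr], equates, seen)
-- ===== SOURCE B (Python) =====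
-- def resolve_expr(expr: str, equates: dict[str, str], seen: set[str] | None = None) -> int | None:
--     # Bounded iteration instead of recursion with a growing visited set: a chain that
--     # takes more than len(equates) lookup steps must revisit some key, i.e. it is a
--     # pure cycle and can never reach a literal, so the step bound alone detects cycles.
--     # (Unlike A, this never mutates the caller's `seen`.)
--     blocked = seen if seen is not None else set()
--     for _ in range(len(equates) + 1):
--         expr = expr.strip()
--         if not expr:
--             return None
--         if expr.startswith("$"):
--             return int(expr[1:], 16)
--         if expr.startswith("0x"):
--             return int(expr, 16)
--         if expr.isdigit():
--             return int(expr)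
--         if expr in blocked or expr not in equates:
--             return None
--         expr = equates[expr]
--     return None
-- ===== Notes on version B (the rewrite author's own statement) =====
-- stated objective: alternative
-- what changed: Replaces A's recursion with a growing mutated `seen` set by a non-recursive loop bounded by len(equates)+1 iterations that checks only the caller-supplied set: by pigeonhole, a chain longer than len(equates) must revisit a key and is therefore a pure cycle, so the step bound alone detects cycles (B never mutates the caller's `seen`; return-value equivalence only).
import Mathlib
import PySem

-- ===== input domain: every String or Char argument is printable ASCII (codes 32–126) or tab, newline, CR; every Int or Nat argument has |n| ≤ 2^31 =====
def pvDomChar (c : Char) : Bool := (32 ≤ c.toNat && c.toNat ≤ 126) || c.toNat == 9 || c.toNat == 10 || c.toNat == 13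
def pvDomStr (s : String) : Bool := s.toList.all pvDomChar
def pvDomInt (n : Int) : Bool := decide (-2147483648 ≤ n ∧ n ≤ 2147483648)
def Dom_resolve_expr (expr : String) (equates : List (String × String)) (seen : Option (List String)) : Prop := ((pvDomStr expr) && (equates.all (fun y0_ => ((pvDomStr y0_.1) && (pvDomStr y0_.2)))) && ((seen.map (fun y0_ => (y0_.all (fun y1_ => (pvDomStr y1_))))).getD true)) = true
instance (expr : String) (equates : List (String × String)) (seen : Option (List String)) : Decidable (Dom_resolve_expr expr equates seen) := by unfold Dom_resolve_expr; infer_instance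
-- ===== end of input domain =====

-- B replaces A's recursion-with-a-growing-visited-set by a loop bounded by len(equates)+1
-- iterations (pigeonhole: a longer chain must revisit a key, i.e. is a pure cycle), checking
-- only the caller-supplied set. Return-value equivalence only: Python A mutates the caller's
-- `seen` set, B never does.


-- ===== PORT A =====
-- the two lemmas below are cited by PORT A's `decreasing_by`: adding an equate key that is
-- not yet in the seen set strictly shrinks the number of equate entries with unseen keys
theorem pv_filter_lt (s : List String) (e : String) (hns : e ∉ s) :
    ∀ (l : List (String × String)), e ∈ l.map Prod.fst →
    (l.filter (fun kv => !(s ++ [e]).contains kv.1)).length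
      < (l.filter (fun kv => !s.contains kv.1)).length := by
  intro l
  induction l with
  | nil => simp
  | cons q rest ih =>
    intro he
    have hmono : (rest.filter (fun kv => !(s ++ [e]).contains kv.1)).length
        ≤ (rest.filter (fun kv => !s.contains kv.1)).length := by
      rw [← List.countP_eq_length_filter, ← List.countP_eq_length_filter]
      apply List.countP_mono_left
      intro a _ ha
      simp at ha ⊢
      exact fun h => absurd (Or.inl h) (by simpa using ha)
    simp only [List.filter_cons]
    by_cases hq : q.1 = e
    · rw [if_neg (by simp [hq]), if_pos (by simp [hq]; exact hns)]
      simpa using Nat.lt_succ_of_le hmono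
    · have he' : e ∈ rest.map Prod.fst := by
        rcases List.mem_map.mp he with ⟨p, hp, hpe⟩
        rcases List.mem_cons.mp hp with h1 | h1
        · exact absurd (h1 ▸ hpe) hq
        · exact List.mem_map.mpr ⟨p, h1, hpe⟩
      have hlt := ih he'
      by_cases hb : ((s ++ [e]).contains q.1 : Bool) = true
      · rw [if_neg (by simp_all), if_neg (by simp_all)]
        exact hlt
      · rw [if_pos (by simp_all), if_pos (by simpa using fun h => hb (by simp [h]))]
        simpa using hlt

theorem pv_mu_lt (equates : List (String × String)) (s : List String) (e : String)
    (hlk : PySem.Dict.contains (PySem.Dict.mk equates) e = true)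
    (hns : PySem.Set.contains s e = false) :
    (equates.filter (fun kv => !(PySem.Set.contains (PySem.Set.add s e) kv.1))).length
      < (equates.filter (fun kv => !(PySem.Set.contains s kv.1))).length := by
  have hns' : e ∉ s := by simpa using hns
  have hadd : PySem.Set.add s e = s ++ [e] := by simp [PySem.Set.add, hns']
  have hmem : e ∈ equates.map Prod.fst := by simpa [PySem.Dict.contains_iff_mem_keys] using hlk
  rw [hadd]
  simpa [PySem.Set.contains] using pv_filter_lt s e hns' equates hmem

def resolve_expr (expr : String) (equates : List (String × String)) (seen : Option (List String)) : Option Int :=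
  let e := PySem.Str.strip expr
  if e = "" then none
  else if PySem.Str.startswith e "$" then PySem.Int.ofStrBase? (PySem.Str.slice e (some 1) none) 16
  else if PySem.Str.startswith e "0x" then PySem.Int.ofStrBase? e 16
  else if PySem.Str.strIsdigit e then PySem.Int.ofStr? e
  else
    let s : List String := match seen with | none => [] | some l => l
    if PySem.Set.contains s e || !(PySem.Dict.contains (PySem.Dict.mk equates) e) then none
    else resolve_expr ((PySem.Dict.get? (PySem.Dict.mk equates) e).getD "") equates
           (some (PySem.Set.add s e))
termination_by
  (equates.filter (fun kv =>
    !(PySem.Set.contains (match seen with | none => [] | some l => l) kv.1))).length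
decreasing_by
  rename_i h
  rw [Bool.not_eq_true, Bool.or_eq_false_iff] at h
  obtain ⟨h1, h2⟩ := h
  rw [Bool.not_eq_false'] at h2
  exact pv_mu_lt equates _ _ h2 h1

-- ===== PORT B =====
def pvGoB (equates : List (String × String)) (s0 : List String) : Nat → String → Option Int
  | 0, _ => none
  | fuel + 1, expr =>
    let e := PySem.Str.strip expr
    if e = "" then none
    else if PySem.Str.startswith e "$" then PySem.Int.ofStrBase? (PySem.Str.slice e (some 1) none) 16
    else if PySem.Str.startswith e "0x" then PySem.Int.ofStrBase? e 16
    else if PySem.Str.strIsdigit e then PySem.Int.ofStr? e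
    else if PySem.Set.contains s0 e || !(PySem.Dict.contains (PySem.Dict.mk equates) e) then none
    else pvGoB equates s0 fuel ((PySem.Dict.get? (PySem.Dict.mk equates) e).getD "")

def resolve_expr_alt (expr : String) (equates : List (String × String)) (seen : Option (List String)) : Option Int :=
  pvGoB equates (match seen with | none => [] | some l => l) (equates.length + 1) expr

-- ===== PRECONDITION & SPEC =====
-- "e (already stripped) is a terminal case: empty, a literal, or a digit string"
def pvTerm (e : String) : Bool :=
  (e == "") || PySem.Str.startswith e "$" || PySem.Str.startswith e "0x" || PySem.Str.strIsdigit e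

-- "e (already stripped) is a well-formed literal candidate": if it is a '$'- or '0x'-string,
-- Python's int(.,16) accepts it
def pvLitOk (e : String) : Bool :=
  if PySem.Str.startswith e "$" then (PySem.Int.ofStrBase? (PySem.Str.slice e (some 1) none) 16).isSome
  else if PySem.Str.startswith e "0x" then (PySem.Int.ofStrBase? e 16).isSome
  else true

-- one saturation step of graph reachability: every member of R that is a non-terminal,
-- non-blocked equate key contributes the (stripped) value it maps to
def pvStepSet (equates : List (String × String)) (s0 : List String) (R : List String) : List String :=
  R.foldl (fun acc e =>
    if !pvTerm e && !(PySem.Set.contains s0 e) then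
      match PySem.Dict.get? (PySem.Dict.mk equates) e with
      | some v => PySem.Set.add acc (PySem.Str.strip v)
      | none => acc
    else acc) R

-- the set of strings reachable from expr via equate lookups (saturated: at most
-- equates.length new strings can ever be added, so equates.length+1 steps reach the fixpoint)
def pvReach (expr : String) (equates : List (String × String)) (s0 : List String) : List String :=
  (pvStepSet equates s0)^[equates.length + 1] [PySem.Str.strip expr]

-- Pre_ excludes EXACTLY the inputs on which Python A raises ValueError: those whose lookup
-- chain reaches a '$'/'0x' string whose digits int(.,16) rejects (A returns no value there,
-- and Python B raises the same ValueError on the same inputs). Stated as a property of the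
-- reachable set of the input's lookup graph, it holds on every input A returns.
def Pre_resolve_expr (expr : String) (equates : List (String × String)) (seen : Option (List String)) : Prop :=
  ∀ e ∈ pvReach expr equates (match seen with | none => [] | some l => l), pvLitOk e = true

instance (expr : String) (equates : List (String × String)) (seen : Option (List String)) : Decidable (Pre_resolve_expr expr equates seen) := by unfold Pre_resolve_expr; infer_instance

def pvWitness_resolve_expr : String × (List (String × String)) × Option (List String) :=
  ("count", [("count", "$1f"), ("limit", "count")], some ["x"])

def Spec_resolve_expr (expr : String) (equates : List (String × String)) (seen : Option (List String)) (out : Option Int) : Prop := out = resolve_expr_alt expr equates seen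
instance (expr : String) (equates : List (String × String)) (seen : Option (List String)) (out : Option Int) : Decidable (Spec_resolve_expr expr equates seen out) := by unfold Spec_resolve_expr; infer_instance

-- ===== CLAIM (what is proved, stated in full; the proofs are below) =====
def Claim_equal_resolve_expr : Prop := ∀ (expr : String) (equates : List (String × String)) (seen : Option (List String)), Dom_resolve_expr expr equates seen → Pre_resolve_expr expr equates seen → Spec_resolve_expr expr equates seen (resolve_expr expr equates seen)

-- ===== LEMMAS AND PROOFS =====
def pvStep (equates : List (String × String)) (s0 : List String) (a b : String) : Prop :=
  pvTerm a = false ∧ PySem.Set.contains s0 a = false ∧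
  PySem.Dict.contains (PySem.Dict.mk equates) a = true ∧
  b = PySem.Str.strip ((PySem.Dict.get? (PySem.Dict.mk equates) a).getD "")

def pvPlus (equates : List (String × String)) (s0 : List String) (a b : String) : Prop :=
  ∃ c, pvStep equates s0 a c ∧ Relation.ReflTransGen (pvStep equates s0) c b

theorem pvPlus_rotate (equates : List (String × String)) (s0 : List String) {c z : String}
    (hstar : Relation.ReflTransGen (pvStep equates s0) c z) (hstep : pvStep equates s0 z c) :
    pvPlus equates s0 c c := by
  rcases hstar.cases_head with h | ⟨d, hcd, hdz⟩
  · exact ⟨c, h ▸ hstep, Relation.ReflTransGen.refl⟩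
  · exact ⟨d, hcd, hdz.tail hstep⟩

theorem pvPlus_tail (equates : List (String × String)) (s0 : List String) {k e c : String}
    (h : pvPlus equates s0 k e) (hstep : pvStep equates s0 e c) :
    pvPlus equates s0 k c := by
  rcases h with ⟨d, hkd, hde⟩
  exact ⟨d, hkd, hde.tail hstep⟩

theorem pvGoB_cycle (equates : List (String × String)) (s0 : List String) :
    ∀ (f : Nat) (x : String),
      pvPlus equates s0 (PySem.Str.strip x) (PySem.Str.strip x) →
      pvGoB equates s0 f x = none := by
  intro f
  induction f with
  | zero => intro x _; rfl
  | succ f ih =>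
    intro x hp
    obtain ⟨c, hstep, hstar⟩ := hp
    obtain ⟨hterm, hs0, hdict, hc⟩ := hstep
    have hterm' := hterm
    simp only [pvTerm, Bool.or_eq_false_iff, beq_eq_false_iff_ne] at hterm'
    obtain ⟨⟨⟨hne, hds⟩, h0x⟩, hdig⟩ := hterm'
    rw [pvGoB]
    simp only [hne, hds, h0x, hdig, hs0, hdict, Bool.false_eq_true, if_false, Bool.not_true,
      Bool.false_or]
    apply ih
    rw [← hc]
    exact pvPlus_rotate equates s0 hstar ⟨hterm, hs0, hdict, hc⟩

theorem pv_main (equates : List (String × String)) (s0 : List String) :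
    ∀ (f : Nat) (S : List String) (x : String),
      (∀ k, PySem.Set.contains s0 k = true → PySem.Set.contains S k = true) →
      (∀ k, PySem.Set.contains S k = true → PySem.Set.contains s0 k = false →
        pvPlus equates s0 k (PySem.Str.strip x)) →
      (equates.filter (fun kv => !(PySem.Set.contains S kv.1))).length < f →
      resolve_expr x equates (some S) = pvGoB equates s0 f x := by
  intro f
  induction f with
  | zero => intro S x _ _ h; omega
  | succ f ih =>
    intro S x hmono hinv hf
    rw [resolve_expr, pvGoB]
    by_cases h1 : PySem.Str.strip x = ""
    · simp only [h1, if_true]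
    · rw [if_neg h1, if_neg h1]
      by_cases h2 : PySem.Str.startswith (PySem.Str.strip x) "$" = true
      · rw [if_pos h2, if_pos h2]
      · rw [if_neg h2, if_neg h2]
        by_cases h3 : PySem.Str.startswith (PySem.Str.strip x) "0x" = true
        · rw [if_pos h3, if_pos h3]
        · rw [if_neg h3, if_neg h3]
          by_cases h4 : PySem.Str.strIsdigit (PySem.Str.strip x) = true
          · rw [if_pos h4, if_pos h4]
          · rw [if_neg h4, if_neg h4]
            have h2' : PySem.Str.startswith (PySem.Str.strip x) "$" = false := by
              cases hb : PySem.Str.startswith (PySem.Str.strip x) "$" with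
              | true => exact absurd hb h2
              | false => rfl
            have h3' : PySem.Str.startswith (PySem.Str.strip x) "0x" = false := by
              cases hb : PySem.Str.startswith (PySem.Str.strip x) "0x" with
              | true => exact absurd hb h3
              | false => rfl
            have h4' : PySem.Str.strIsdigit (PySem.Str.strip x) = false := by
              cases hb : PySem.Str.strIsdigit (PySem.Str.strip x) with
              | true => exact absurd hb h4
              | false => rfl
            have hterm : pvTerm (PySem.Str.strip x) = false := by
              simp only [pvTerm, h2', h3', h4', Bool.or_false, beq_eq_false_iff_ne, ne_eq]
              exact h1
            show (if (PySem.Set.contains S (PySem.Str.strip x)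
                      || !PySem.Dict.contains (PySem.Dict.mk equates) (PySem.Str.strip x)) = true then none
                  else resolve_expr ((PySem.Dict.get? (PySem.Dict.mk equates) (PySem.Str.strip x)).getD "")
                        equates (some (PySem.Set.add S (PySem.Str.strip x)))) =
                 (if (PySem.Set.contains s0 (PySem.Str.strip x)
                      || !PySem.Dict.contains (PySem.Dict.mk equates) (PySem.Str.strip x)) = true then none
                  else pvGoB equates s0 f ((PySem.Dict.get? (PySem.Dict.mk equates) (PySem.Str.strip x)).getD ""))
            by_cases hdP : PySem.Dict.contains (PySem.Dict.mk equates) (PySem.Str.strip x) = true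
            · cases hcs0 : PySem.Set.contains s0 (PySem.Str.strip x) with
              | true =>
                have hcS := hmono _ hcs0
                rw [if_pos (c := (PySem.Set.contains S (PySem.Str.strip x)
                      || !PySem.Dict.contains (PySem.Dict.mk equates) (PySem.Str.strip x)) = true)
                    (by simp only [hcS, Bool.true_or]),
                  if_pos (c := (true
                      || !PySem.Dict.contains (PySem.Dict.mk equates) (PySem.Str.strip x)) = true)
                    (by simp)]
              | false =>
                rw [if_neg (c := (false
                      || !PySem.Dict.contains (PySem.Dict.mk equates) (PySem.Str.strip x)) = true)
                    (by simp only [hdP, Bool.not_true, Bool.or_false]; simp)]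
                cases hcS : PySem.Set.contains S (PySem.Str.strip x) with
                | true =>
                  rw [if_pos (c := (true
                        || !PySem.Dict.contains (PySem.Dict.mk equates) (PySem.Str.strip x)) = true)
                      (by simp)]
                  have hplus := hinv _ hcS hcs0
                  obtain ⟨c, hec, hstar⟩ := hplus
                  obtain ⟨_, _, _, hc⟩ := hec
                  have hcyc : pvPlus equates s0
                      (PySem.Str.strip ((PySem.Dict.get? (PySem.Dict.mk equates) (PySem.Str.strip x)).getD ""))
                      (PySem.Str.strip ((PySem.Dict.get? (PySem.Dict.mk equates) (PySem.Str.strip x)).getD "")) := by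
                    rw [← hc]
                    exact pvPlus_rotate equates s0 hstar ⟨hterm, hcs0, hdP, hc⟩
                  exact (pvGoB_cycle equates s0 f _ hcyc).symm
                | false =>
                  rw [if_neg (c := (false
                        || !PySem.Dict.contains (PySem.Dict.mk equates) (PySem.Str.strip x)) = true)
                      (by simp only [hdP, Bool.not_true, Bool.or_false]; simp)]
                  apply ih
                  · intro k hk
                    have hkS : k ∈ S := (PySem.Set.contains_iff ..).mp (hmono k hk)
                    rw [PySem.Set.contains_iff, PySem.Set.mem_add]
                    exact Or.inl hkS
                  · intro k hk hk0
                    rw [PySem.Set.contains_iff, PySem.Set.mem_add] at hk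
                    rcases hk with hkS | hke
                    · exact pvPlus_tail equates s0 (hinv k ((PySem.Set.contains_iff ..).mpr hkS) hk0)
                        ⟨hterm, hcs0, hdP, rfl⟩
                    · subst hke
                      exact ⟨_, ⟨hterm, hcs0, hdP, rfl⟩, Relation.ReflTransGen.refl⟩
                  · have hlt := pv_mu_lt equates S (PySem.Str.strip x) hdP hcS
                    omega
            · have hd' : PySem.Dict.contains (PySem.Dict.mk equates) (PySem.Str.strip x) = false := by
                cases hb : PySem.Dict.contains (PySem.Dict.mk equates) (PySem.Str.strip x) with
                | true => exact absurd hb hdP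
                | false => rfl
              rw [if_pos (c := (PySem.Set.contains S (PySem.Str.strip x)
                    || !PySem.Dict.contains (PySem.Dict.mk equates) (PySem.Str.strip x)) = true)
                  (by simp only [hd', Bool.not_false, Bool.or_true])]
              rw [if_pos (c := (PySem.Set.contains s0 (PySem.Str.strip x)
                    || !PySem.Dict.contains (PySem.Dict.mk equates) (PySem.Str.strip x)) = true)
                  (by simp only [hd', Bool.not_false, Bool.or_true])]

theorem pv_none_eq_some_nil (x : String) (equates : List (String × String)) :
    resolve_expr x equates none = resolve_expr x equates (some []) := by
  rw [resolve_expr, resolve_expr]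

theorem pv_final (expr : String) (equates : List (String × String)) (seen : Option (List String)) :
    resolve_expr expr equates seen = resolve_expr_alt expr equates seen := by
  unfold resolve_expr_alt
  have hf : ∀ (S : List String),
      (equates.filter (fun kv => !(PySem.Set.contains S kv.1))).length < equates.length + 1 :=
    fun S => Nat.lt_succ_of_le (List.length_filter_le _ _)
  cases seen with
  | none =>
    rw [pv_none_eq_some_nil]
    exact pv_main equates [] (equates.length + 1) [] expr
      (fun k hk => hk) (fun k hk _ => by simp [PySem.Set.contains] at hk) (hf [])
  | some l =>
    exact pv_main equates l (equates.length + 1) l expr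
      (fun k hk => hk) (fun k hk hk0 => absurd hk (by rw [hk0]; exact Bool.false_ne_true)) (hf l)

-- ===== VERDICT (by name: the statement is the Claim_ definition above) =====
theorem resolve_expr_spec : Claim_equal_resolve_expr := by
  intro expr equates seen _ _
  unfold Spec_resolve_expr
  exact pv_final expr equates seen
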